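-- pv_equiv track=rewrite | github.com/AegisLenz/AegisLenz-BE | services/policy/service_filtering.py | cluster_logs_by_event_source_prefix
-- ===== SOURCE A (Python) =====
-- def cluster_logs_by_event_source_prefix(logs):
--     """
--     eventSource의 접두어로 로그를 클러스터링합니다.
--     """
--     clustered_logs = {}
--     for record in logs.get('Records', []):
--         event_source = record.get('eventSource', '')
--         prefix = event_source.split('.')[0] if event_source else 'unknown'
--         if prefix not in clustered_logs:
--             clustered_logs[prefix] = []
--         clustered_logs[prefix].append(record)
--     return clustered_logs
-- ===== SOURCE B (Python) =====
-- def cluster_logs_by_event_source_prefix(logs):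
--     """
--     eventSource의 접두어로 로그를 클러스터링합니다.
--     Recursive partition: peel off the first remaining record's prefix group,
--     then recurse on the records whose prefix differs.
--     """
--     def prefix(record):
--         event_source = record.get('eventSource', '')
--         return event_source.split('.')[0] if event_source else 'unknown'
--
--     def go(records):
--         if not records:
--             return {}
--         p = prefix(records[0])
--         grouped = {p: [r for r in records if prefix(r) == p]}
--         grouped.update(go([r for r in records if prefix(r) != p]))
--         return grouped
--
--     return go(logs.get('Records', []))
-- ===== Notes on version B (the rewrite author's own statement) =====
-- stated objective: alternative
-- what changed: Replaces A's single-pass dict accumulation with a recursive partition: repeatedly split off the leading record's whole prefix group (two filters) and recurse on the remainder, building the dict group by group.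
import Mathlib
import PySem

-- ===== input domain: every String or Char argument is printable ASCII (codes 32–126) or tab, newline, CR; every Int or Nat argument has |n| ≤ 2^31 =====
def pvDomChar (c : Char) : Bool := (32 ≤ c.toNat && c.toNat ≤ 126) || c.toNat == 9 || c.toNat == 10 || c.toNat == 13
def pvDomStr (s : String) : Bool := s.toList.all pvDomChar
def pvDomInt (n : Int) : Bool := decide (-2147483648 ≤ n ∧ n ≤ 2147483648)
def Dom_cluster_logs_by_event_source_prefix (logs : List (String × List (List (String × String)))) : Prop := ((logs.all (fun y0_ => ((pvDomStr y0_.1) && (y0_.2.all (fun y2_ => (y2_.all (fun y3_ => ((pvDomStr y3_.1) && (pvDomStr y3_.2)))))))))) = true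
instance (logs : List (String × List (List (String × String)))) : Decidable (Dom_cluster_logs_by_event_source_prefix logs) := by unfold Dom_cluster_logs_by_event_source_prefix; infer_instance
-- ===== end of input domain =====

-- B replaces A's single-pass dict accumulation by a recursive partition (peel off the leading
-- record's whole prefix group, recurse on the remainder); objective: alternative, not faster.

-- shared prefix rule: record.get('eventSource', ''); es.split('.')[0] if es else 'unknown'
def pvPrefix (record : List (String × String)) : String :=
  let event_source := (PySem.Dict.mk record).getD "eventSource" ""
  -- split? is `some` here since the separator "." is non-empty
  if event_source ≠ "" then PySem.List.pyGetD ((PySem.Str.split? event_source ".").getD []) 0 "" else "unknown"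

-- ===== PORT A =====
def cluster_logs_by_event_source_prefix (logs : List (String × List (List (String × String)))) : List (String × List (List (String × String))) :=
  (((PySem.Dict.mk logs).getD "Records" []).foldl
    (fun clustered record =>
      let p := pvPrefix record
      let clustered := if clustered.contains p = false then clustered.insert p [] else clustered
      clustered.modify p [] (fun g => g ++ [record]))
    PySem.Dict.empty).items

-- ===== PORT B =====
def pvGroupGo (records : List (List (String × String))) : List (String × List (List (String × String))) :=
  match records with
  | [] => []
  | r :: rs =>
    let p := pvPrefix r
    (p, (r :: rs).filter (fun q => pvPrefix q == p)) ::
      pvGroupGo ((r :: rs).filter (fun q => pvPrefix q != p))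
termination_by records.length
decreasing_by
  simp only [List.filter_cons, bne_self_eq_false, List.length_cons]
  exact Nat.lt_succ_of_le (List.length_filter_le _ _)

def cluster_logs_by_event_source_prefix_alt (logs : List (String × List (List (String × String)))) : List (String × List (List (String × String))) :=
  pvGroupGo ((PySem.Dict.mk logs).getD "Records" [])

-- ===== PRECONDITION & SPEC =====
def Spec_cluster_logs_by_event_source_prefix (logs : List (String × List (List (String × String)))) (out : List (String × List (List (String × String)))) : Prop := out = cluster_logs_by_event_source_prefix_alt logs
instance (logs : List (String × List (List (String × String)))) (out : List (String × List (List (String × String)))) : Decidable (Spec_cluster_logs_by_event_source_prefix logs out) := by unfold Spec_cluster_logs_by_event_source_prefix; infer_instance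

-- ===== CLAIM (what is proved, stated in full; the proofs are below) =====
def Claim_equal_cluster_logs_by_event_source_prefix : Prop := ∀ (logs : List (String × List (List (String × String)))), Dom_cluster_logs_by_event_source_prefix logs → Spec_cluster_logs_by_event_source_prefix logs (cluster_logs_by_event_source_prefix logs)

-- ===== LEMMAS AND PROOFS =====

-- A's loop step, named for the proofs
def pvStepA (clustered : PySem.Dict String (List (List (String × String)))) (record : List (String × String)) : PySem.Dict String (List (List (String × String))) :=
  let p := pvPrefix record
  let clustered := if clustered.contains p = false then clustered.insert p [] else clustered
  clustered.modify p [] (fun g => g ++ [record])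

-- the group A's dict holds at key c after the loop
lemma pvGetD_foldA (rs : List (List (String × String))) (d : PySem.Dict String (List (List (String × String)))) (c : String) :
    (rs.foldl pvStepA d).getD c [] = d.getD c [] ++ rs.filter (fun q => pvPrefix q == c) := by
  induction rs generalizing d with
  | nil => simp
  | cons r rs ih =>
    rw [List.foldl_cons, ih, List.filter_cons]
    have hstep : (pvStepA d r).getD c [] =
        if c = pvPrefix r then d.getD c [] ++ [r] else d.getD c [] := by
      by_cases hc : c = pvPrefix r
      · subst hc
        simp only [pvStepA, PySem.Dict.getD_modify, if_pos trivial]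
        by_cases hcont : d.contains (pvPrefix r) = false
        · rw [if_pos hcont]
          simp [PySem.Dict.getD_of_not_contains d [] hcont]
        · simp [hcont]
      · simp only [pvStepA, PySem.Dict.getD_modify, if_neg hc]
        by_cases hcont : d.contains (pvPrefix r) = false
        · simp [hcont, PySem.Dict.getD_insert, hc]
        · simp [hcont]
    rw [hstep]
    by_cases hc : c = pvPrefix r
    · have : (pvPrefix r == c) = true := by simp [hc]
      simp [hc]
    · have : (pvPrefix r == c) = false := by simp [Ne.symm hc]
      simp [hc, this]

-- the keys A's dict collects are the prefixes, first appearance first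
lemma pvKeys_foldA (rs : List (List (String × String))) (d : PySem.Dict String (List (List (String × String)))) :
    (rs.foldl pvStepA d).keys = PySem.Set.update d.keys (rs.map pvPrefix) := by
  induction rs generalizing d with
  | nil => simp [PySem.Set.update]
  | cons r rs ih =>
    rw [List.foldl_cons, ih, List.map_cons, PySem.Set.update_cons]
    congr 1
    by_cases hcont : d.contains (pvPrefix r) = false
    · simp only [pvStepA, if_pos hcont]
      rw [PySem.Dict.keys_modify,
        PySem.Dict.keys_insert_of_contains _ _ (by simp [PySem.Dict.contains_insert_self]),
        PySem.Dict.keys_insert_of_not_contains d _ hcont,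
        PySem.Set.add_of_not_mem]
      intro hmem
      rw [← PySem.Dict.contains_iff_mem_keys] at hmem
      simp [hmem] at hcont
    · have hcont' : d.contains (pvPrefix r) = true := by simpa using hcont
      simp only [pvStepA, if_neg hcont]
      rw [PySem.Dict.keys_modify, PySem.Dict.keys_insert_of_contains _ _ hcont',
        PySem.Set.add_of_mem ((PySem.Dict.contains_iff_mem_keys _ _).mp hcont')]

-- A's result, characterised: distinct prefixes in order, each with its filtered group
lemma pvA_eq (rs : List (List (String × String))) :
    (rs.foldl pvStepA PySem.Dict.empty).items =
      (PySem.Set.ofList (rs.map pvPrefix)).map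
        (fun p => (p, rs.filter (fun q => pvPrefix q == p))) := by
  have hkeys : (rs.foldl pvStepA PySem.Dict.empty).keys = PySem.Set.ofList (rs.map pvPrefix) := by
    rw [pvKeys_foldA]
    simp [PySem.Dict.keys_empty, PySem.Set.update_nil_left]
  have hnd : (rs.foldl pvStepA PySem.Dict.empty).keys.Nodup := by
    rw [hkeys]; exact PySem.Set.nodup_ofList _
  rw [PySem.Dict.items_eq_map_keys _ hnd [], hkeys]
  refine List.map_congr_left fun c _ => ?_
  rw [pvGetD_foldA]
  simp

-- ofList commutes with filter
lemma pvOfList_filter (xs : List String) (q : String → Bool) :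
    PySem.Set.ofList (xs.filter q) = (PySem.Set.ofList xs).filter q := by
  induction xs with
  | nil => rfl
  | cons x xs ih =>
    rw [List.filter_cons, PySem.Set.ofList_cons, List.filter_cons]
    by_cases hq : q x = true
    · rw [if_pos hq, hq, PySem.Set.ofList_cons, ih]
      simp only [PySem.Set.discard, List.filter_filter]
      refine congrArg (x :: ·) (List.filter_congr fun y _ => ?_)
      exact Bool.and_comm _ _
    · have hq' : q x = false := by simpa using hq
      rw [if_neg hq, hq', ih]
      simp only [PySem.Set.discard, List.filter_filter]
      refine List.filter_congr fun y _ => ?_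
      by_cases hyx : y = x
      · subst hyx; simp [hq']
      · simp [hyx]

-- B's recursion, characterised the same way
lemma pvB_eq : ∀ (rs : List (List (String × String))),
    pvGroupGo rs =
      (PySem.Set.ofList (rs.map pvPrefix)).map
        (fun p => (p, rs.filter (fun q => pvPrefix q == p)))
  | [] => by simp [pvGroupGo]
  | r :: rs => by
    have hrest : (r :: rs).filter (fun q => pvPrefix q != pvPrefix r)
        = rs.filter (fun q => pvPrefix q != pvPrefix r) := by
      simp
    have ih := pvB_eq (rs.filter (fun q => pvPrefix q != pvPrefix r))
    simp only [pvGroupGo]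
    rw [hrest, ih, List.map_cons, PySem.Set.ofList_cons, List.map_cons]
    congr 1
    have hmap : (rs.filter (fun q => pvPrefix q != pvPrefix r)).map pvPrefix
        = (rs.map pvPrefix).filter (fun x => x != pvPrefix r) := by
      rw [List.filter_map]; rfl
    rw [hmap, pvOfList_filter]
    have hdisc : (PySem.Set.ofList (rs.map pvPrefix)).filter (fun x => x != pvPrefix r)
        = PySem.Set.discard (PySem.Set.ofList (rs.map pvPrefix)) (pvPrefix r) := by
      simp [PySem.Set.discard, bne]
    rw [hdisc]
    refine List.map_congr_left fun c hc => ?_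
    have hcp : c ≠ pvPrefix r :=
      ((PySem.Set.mem_discard (PySem.Set.ofList (rs.map pvPrefix)) (pvPrefix r) c).mp hc).2
    congr 1
    rw [List.filter_filter, List.filter_cons]
    have hhead : (pvPrefix r == c) = false := by simp [Ne.symm hcp]
    rw [if_neg (by simp [hhead])]
    refine List.filter_congr fun y _ => ?_
    by_cases hy : pvPrefix y = c
    · simp [hy, hcp]
    · simp [hy]
termination_by rs => rs.length
decreasing_by
  simp only [List.length_cons]
  exact Nat.lt_succ_of_le (List.length_filter_le _ _)

-- ===== VERDICT (by name: the statement is the Claim_ definition above) =====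
theorem cluster_logs_by_event_source_prefix_spec : Claim_equal_cluster_logs_by_event_source_prefix := by
  intro logs _
  show _ = _
  unfold cluster_logs_by_event_source_prefix cluster_logs_by_event_source_prefix_alt
  rw [show (fun (clustered : PySem.Dict String (List (List (String × String)))) record =>
      let p := pvPrefix record
      let clustered := if clustered.contains p = false then clustered.insert p [] else clustered
      clustered.modify p [] (fun g => g ++ [record])) = pvStepA from rfl]
  rw [pvA_eq, pvB_eq]
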